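-- pv_equiv track=rewrite | github.com/umeshshetty/peoples-agent | backend/entity_resolver.py | has_distinguishing_context
-- ===== SOURCE A (Python) =====
-- def has_distinguishing_context(new_name: str, existing_name: str, context: str) -> bool:
--     """
--     Check if context contains info that distinguishes two similar entities.
--     E.g., "John Smith from Marketing" vs "John Smith from Engineering"
--     """
--     context_lower = context.lower()
--
--     # Look for role/department indicators
--     distinguishing_patterns = [
--         "from ", "at ", "in ", "the ", "our ", "their ",
--         "manager", "director", "lead", "head", "chief",
--         "department", "team", "company", "org"
--     ]
--
--     # If new name appears with distinguishing context, keep separate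
--     new_name_lower = new_name.lower()
--     for pattern in distinguishing_patterns:
--         # Check if pattern appears near the entity name
--         if pattern in context_lower:
--             idx = context_lower.find(new_name_lower)
--             if idx != -1:
--                 # Check 50 chars before and after
--                 window_start = max(0, idx - 50)
--                 window_end = min(len(context), idx + len(new_name) + 50)
--                 window = context_lower[window_start:window_end]
--                 if pattern in window:
--                     return True
--
--     return False
-- ===== SOURCE B (Python) =====
-- _DISTINGUISHING_PATTERNS = [
--     "from ", "at ", "in ", "the ", "our ", "their ",
--     "manager", "director", "lead", "head", "chief",
--     "department", "team", "company", "org"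
-- ]
--
-- def has_distinguishing_context(new_name: str, existing_name: str, context: str) -> bool:
--     """Positional scan: instead of building the +/-50-char window string and doing
--     substring searches in it, walk the positions of the lowered context around the
--     first occurrence of the name and test each pattern by startswith at that offset."""
--     cl = context.lower()
--     idx = cl.find(new_name.lower())
--     if idx == -1:
--         return False
--     lo = max(0, idx - 50)
--     hi = min(len(context), idx + len(new_name) + 50)
--     for j in range(lo, hi):
--         for p in _DISTINGUISHING_PATTERNS:
--             if j + len(p) <= hi and cl.startswith(p, j):
--                 return True
--     return False
-- ===== Notes on version B (the rewrite author's own statement) =====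
-- stated objective: alternative
-- what changed: A loops over the 15 patterns, re-finding the name and re-slicing a +/-50-char window string per pattern and testing 'pattern in window'; B finds the name once and then never materialises a window: it walks the positions lo..hi-1 of the lowered context and tests each pattern by a bounded startswith at that offset, so the result comes from position arithmetic instead of substring searches in a sliced copy.
import Mathlib
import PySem

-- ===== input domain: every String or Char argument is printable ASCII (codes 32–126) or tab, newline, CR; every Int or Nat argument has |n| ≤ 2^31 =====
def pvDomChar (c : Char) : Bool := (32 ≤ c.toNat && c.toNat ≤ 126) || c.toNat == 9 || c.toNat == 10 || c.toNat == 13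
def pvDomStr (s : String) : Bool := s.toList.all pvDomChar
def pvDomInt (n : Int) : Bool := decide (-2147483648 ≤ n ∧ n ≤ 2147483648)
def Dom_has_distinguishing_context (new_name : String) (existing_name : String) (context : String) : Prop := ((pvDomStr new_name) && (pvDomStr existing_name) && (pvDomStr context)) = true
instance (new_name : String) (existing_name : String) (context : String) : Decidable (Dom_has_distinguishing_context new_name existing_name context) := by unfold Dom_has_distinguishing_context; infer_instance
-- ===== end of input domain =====

-- B replaces A's per-pattern loop (which re-finds the name and re-slices a ±50-char
-- window string for each of the 15 patterns) by a positional scan: find the name once,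
-- then walk the window positions and test each pattern by a bounded startswith at that
-- offset — no window string is ever built; objective: alternative.

-- ===== PORT A =====
def pvPatterns : List String :=
  ["from ", "at ", "in ", "the ", "our ", "their ",
   "manager", "director", "lead", "head", "chief",
   "department", "team", "company", "org"]

-- the 'for pattern in distinguishing_patterns' loop of A, with its early return
def hdcLoop (context_lower : String) (new_name_lower : String)
    (new_name : String) (context : String) : List String → Bool
  | [] => false
  | p :: rest =>
    if PySem.Str.isIn p context_lower then
      let idx := PySem.Str.find context_lower new_name_lower
      if idx ≠ -1 then
        let window := PySem.Str.slice context_lower (some (max 0 (idx - 50)))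
          (some (min (PySem.Str.len context) (idx + PySem.Str.len new_name + 50)))
        if PySem.Str.isIn p window then true
        else hdcLoop context_lower new_name_lower new_name context rest
      else hdcLoop context_lower new_name_lower new_name context rest
    else hdcLoop context_lower new_name_lower new_name context rest

def has_distinguishing_context (new_name : String) (existing_name : String) (context : String) : Bool :=
  let context_lower := PySem.Str.lower context
  let new_name_lower := PySem.Str.lower new_name
  hdcLoop context_lower new_name_lower new_name context pvPatterns

-- ===== PORT B =====
-- cl.startswith(p, j) with 0 ≤ j is ported exactly as 'p.toList <+: cl.toList.drop j.toNat'
-- (Chars.startswith on the drop); every j produced by pyRange lo hi 1 has 0 ≤ lo ≤ j.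
def has_distinguishing_context_alt (new_name : String) (existing_name : String) (context : String) : Bool :=
  let cl := PySem.Str.lower context
  let idx := PySem.Str.find cl (PySem.Str.lower new_name)
  if idx == -1 then false
  else
    let lo := max 0 (idx - 50)
    let hi := min (PySem.Str.len context) (idx + PySem.Str.len new_name + 50)
    (PySem.List.pyRange lo hi 1).any (fun j =>
      pvPatterns.any (fun p =>
        decide (j + (PySem.Str.len p) ≤ hi) &&
          PySem.Chars.startswith (cl.toList.drop j.toNat) p.toList))

-- ===== PRECONDITION & SPEC =====
def Spec_has_distinguishing_context (new_name : String) (existing_name : String) (context : String) (out : Bool) : Prop := out = has_distinguishing_context_alt new_name existing_name context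
instance (new_name : String) (existing_name : String) (context : String) (out : Bool) : Decidable (Spec_has_distinguishing_context new_name existing_name context out) := by unfold Spec_has_distinguishing_context; infer_instance

-- ===== CLAIM (what is proved, stated in full; the proofs are below) =====
def Claim_equal_has_distinguishing_context : Prop := ∀ (new_name : String) (existing_name : String) (context : String), Dom_has_distinguishing_context new_name existing_name context → Spec_has_distinguishing_context new_name existing_name context (has_distinguishing_context new_name existing_name context)

-- ===== LEMMAS AND PROOFS =====

-- a slice of xs is an infix of xs
theorem pv_slice_infix {α : Type} (xs : List α) (a? b? : Option Int) :
    PySem.List.slice xs a? b? <:+: xs := by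
  unfold PySem.List.slice
  exact List.IsInfix.trans (List.take_prefix _ _).isInfix (List.drop_suffix _ _).isInfix

-- lowering preserves the length
theorem pv_len_lower (s : String) : (PySem.Chars.lower s.toList).length = s.length := by
  unfold PySem.Chars.lower
  simp

-- if a pattern occurs in the window (an infix of cl) it occurs in cl
theorem pv_isIn_of_isIn_window (p cl : List Char) (a? b? : Option Int)
    (h : PySem.Chars.isIn p (PySem.List.slice cl a? b?) = true) :
    PySem.Chars.isIn p cl = true := by
  rw [PySem.Chars.isIn_iff_infix] at h ⊢
  exact h.trans (pv_slice_infix cl a? b?)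

-- if the name is absent, A's loop returns false
theorem hdcLoop_of_find_neg (cl nl nn ctx : String)
    (h : PySem.Chars.find cl.toList nl.toList = -1) (ps : List String) :
    hdcLoop cl nl nn ctx ps = false := by
  induction ps with
  | nil => rfl
  | cons p rest ih => simp [hdcLoop, h, ih]

-- if the name is present, A's loop is a single any-pass over the window
theorem hdcLoop_of_find_pos (cl nl nn ctx : String)
    (h : ¬ PySem.Chars.find cl.toList nl.toList = -1) (ps : List String) :
    hdcLoop cl nl nn ctx ps =
      ps.any (fun p => PySem.Chars.isIn p.toList (PySem.List.slice cl.toList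
        (some (max 0 (PySem.Chars.find cl.toList nl.toList - 50)))
        (some (min (ctx.length : Int) (PySem.Chars.find cl.toList nl.toList + (nn.length : Int) + 50))))) := by
  induction ps with
  | nil => rfl
  | cons p rest ih =>
    by_cases hc : PySem.Chars.isIn p.toList cl.toList = true
    · simp [hdcLoop, hc, h, ih]
    · simp only [Bool.not_eq_true] at hc
      have hw : PySem.Chars.isIn p.toList (PySem.List.slice cl.toList
          (some (max 0 (PySem.Chars.find cl.toList nl.toList - 50)))
          (some (min (ctx.length : Int) (PySem.Chars.find cl.toList nl.toList + (nn.length : Int) + 50)))) = false := by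
        by_contra hne
        simp only [Bool.not_eq_false] at hne
        rw [pv_isIn_of_isIn_window _ _ _ _ hne] at hc
        exact Bool.true_eq_false.mp hc
      simp [hdcLoop, hc, hw, ih]

-- a nonempty pattern is an infix of the slice xs[lo:hi] iff it is a prefix of some
-- drop of xs starting inside [lo, hi) and ending by hi (the positional reading)
theorem pv_infix_slice_iff (p cl : List Char) (lo hi : Int)
    (hlo : 0 ≤ lo) (hlohi : lo ≤ hi) (hhi : hi ≤ (cl.length : Int)) (hp : p ≠ []) :
    (p <:+: PySem.List.slice cl (some lo) (some hi)) ↔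
      ∃ j : Int, lo ≤ j ∧ j < hi ∧ j + (p.length : Int) ≤ hi ∧ p <+: cl.drop j.toNat := by
  rw [PySem.List.slice_toNat cl hlo (le_trans hlo hlohi)]
  constructor
  · rintro ⟨s, t, hst⟩
    refine ⟨lo + s.length, by omega, ?_, ?_, ?_⟩
    · have hlen : s.length + p.length + t.length = ((cl.drop lo.toNat).take (hi.toNat - lo.toNat)).length := by
        rw [← hst]; simp; omega
      have hlen2 : ((cl.drop lo.toNat).take (hi.toNat - lo.toNat)).length = hi.toNat - lo.toNat := by
        simp; omega
      have hpl : 1 ≤ p.length := by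
        cases p with
        | nil => exact absurd rfl hp
        | cons _ _ => simp
      omega
    · have hlen : s.length + p.length + t.length = ((cl.drop lo.toNat).take (hi.toNat - lo.toNat)).length := by
        rw [← hst]; simp; omega
      have hlen2 : ((cl.drop lo.toNat).take (hi.toNat - lo.toNat)).length = hi.toNat - lo.toNat := by
        simp; omega
      omega
    · have hdrop : ((cl.drop lo.toNat).take (hi.toNat - lo.toNat)).drop s.length = p ++ t := by
        rw [← hst]; simp
      have hj : (lo + (s.length : Int)).toNat = lo.toNat + s.length := by omega
      rw [hj]
      have : p <+: ((cl.drop lo.toNat).take (hi.toNat - lo.toNat)).drop s.length := by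
        rw [hdrop]; exact ⟨t, rfl⟩
      rw [List.drop_take, List.drop_drop] at this
      simpa [Nat.add_comm] using this.trans (List.take_prefix _ _)
  · rintro ⟨j, hj1, hj2, hj3, hpre⟩
    -- p is a prefix of (cl.drop j.toNat); with j + |p| ≤ hi it sits inside the slice
    have hpre' : p <+: ((cl.drop lo.toNat).drop (j.toNat - lo.toNat)).take (hi.toNat - lo.toNat - (j.toNat - lo.toNat)) := by
      rw [List.prefix_take_iff, List.drop_drop]
      exact ⟨by rw [show lo.toNat + (j.toNat - lo.toNat) = j.toNat by omega]; exact hpre, by omega⟩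
    have hinf : p <:+: ((cl.drop lo.toNat).take (hi.toNat - lo.toNat)).drop (j.toNat - lo.toNat) := by
      rw [List.drop_take]; exact hpre'.isInfix
    exact hinf.trans (List.drop_suffix _ _).isInfix

-- every pattern is nonempty
theorem pv_patterns_ne_nil : ∀ p ∈ pvPatterns, p.toList ≠ [] := by decide

-- the per-pattern any over the window equals the positional double any
theorem pv_any_window_eq_positional (cl : List Char) (lo hi : Int)
    (hlo : 0 ≤ lo) (hlohi : lo ≤ hi) (hhi : hi ≤ (cl.length : Int)) :
    (pvPatterns.any (fun p => PySem.Chars.isIn p.toList (PySem.List.slice cl (some lo) (some hi))))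
      = (PySem.List.pyRange lo hi 1).any (fun j =>
          pvPatterns.any (fun p =>
            decide (j + ((p.toList.length : Int)) ≤ hi) &&
              PySem.Chars.startswith (cl.drop j.toNat) p.toList)) := by
  rw [Bool.eq_iff_iff]
  simp only [List.any_eq_true, Bool.and_eq_true, decide_eq_true_eq,
    PySem.Chars.isIn_iff_infix, PySem.Chars.startswith_iff, PySem.List.mem_pyRange_one]
  constructor
  · rintro ⟨p, hpmem, hinf⟩
    obtain ⟨j, hj1, hj2, hj3, hpre⟩ :=
      (pv_infix_slice_iff p.toList cl lo hi hlo hlohi hhi (pv_patterns_ne_nil p hpmem)).mp hinf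
    exact ⟨j, ⟨hj1, hj2⟩, p, hpmem, hj3, hpre⟩
  · rintro ⟨j, ⟨hj1, hj2⟩, p, hpmem, hj3, hpre⟩
    refine ⟨p, hpmem, ?_⟩
    exact (pv_infix_slice_iff p.toList cl lo hi hlo hlohi hhi (pv_patterns_ne_nil p hpmem)).mpr
      ⟨j, hj1, hj2, hj3, hpre⟩

-- ===== VERDICT (by name: the statement is the Claim_ definition above) =====
theorem has_distinguishing_context_spec : Claim_equal_has_distinguishing_context := by
  intro new_name existing_name context _
  unfold Spec_has_distinguishing_context has_distinguishing_context has_distinguishing_context_alt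
  by_cases h : PySem.Chars.find (PySem.Chars.lower context.toList) (PySem.Chars.lower new_name.toList) = -1
  · rw [hdcLoop_of_find_neg _ _ _ _ (by simpa using h)]
    simp [h]
  · rw [hdcLoop_of_find_pos _ _ _ _ (by simpa using h)]
    simp only [PySem.Str.toList_lower, PySem.Str.find, PySem.Str.len]
    set cl := PySem.Chars.lower context.toList with hcl
    set idx := PySem.Chars.find cl (PySem.Chars.lower new_name.toList) with hidx
    have hlen : (cl.length : Int) = (context.length : Int) := by
      rw [hcl, pv_len_lower]
    have h0 : 0 ≤ idx := by
      have := PySem.Chars.neg_one_le_find cl (PySem.Chars.lower new_name.toList)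
      rw [← hidx] at this; omega
    have hle : idx ≤ (cl.length : Int) := PySem.Chars.find_le_length cl _
    have hlo : (0:Int) ≤ max 0 (idx - 50) := le_max_left _ _
    have hlohi : max 0 (idx - 50) ≤ min (context.length : Int) (idx + (new_name.length : Int) + 50) := by
      rw [← hlen]; omega
    have hhi : min (context.length : Int) (idx + (new_name.length : Int) + 50) ≤ (cl.length : Int) := by
      rw [hlen]; exact min_le_left _ _
    rw [pv_any_window_eq_positional cl _ _ hlo hlohi hhi]
    simp [h]
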